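-- pv_equiv track=rewrite | github.com/lpryszcz/bin | bam2snps.py | _get_base_counts_old
-- ===== SOURCE A (Python) =====
-- def _get_base_counts_old( ref,alts,alphabet ):
--   """Return a list of A,C,G and T frequencies in given position of the alignment.
--   """
--   alts=alts.upper()
--   #remove indels info
--   for symbol in ('-','+'):
--     while symbol in alts:
--       i=alts.index(symbol)
--       baseNo=int(alts[i+1])
--       alts=alts[:i]+alts[i+baseNo+2:]
--   #count base occurencies
--   base_counts=[]
--   for base in alphabet:
--     if base!=ref: base_counts.append( alts.count(base) ) #base_counts.append( alts.count('.')+alts.count(',') )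
--     else:         base_counts.append( 0 )
--   return base_counts
-- ===== SOURCE B (Python) =====
-- def _get_base_counts_old(ref, alts, alphabet):
--     """Return a list of base frequencies in given position of the alignment.
--
--     Each indel phase is one left-to-right scan (skip int(alts[i+1])+2 chars at a
--     marker, keep everything else) instead of repeated index()+slice rebuilding.
--     """
--     alts = alts.upper()
--     for symbol in ('-', '+'):
--         kept = []
--         i, n = 0, len(alts)
--         while i < n:
--             if alts[i] == symbol:
--                 kept_len = int(alts[i + 1])  # raises like A on a non-digit
--                 i += kept_len + 2
--             else:
--                 kept.append(alts[i])
--                 i += 1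
--         alts = ''.join(kept)
--     return [0 if base == ref else alts.count(base) for base in alphabet]
-- ===== Notes on version B (the rewrite author's own statement) =====
-- stated objective: alternative
-- what changed: Each indel phase is a single left-to-right scan with an index that jumps int(alts[i+1])+2 at a marker and collects survivors once, replacing A's repeated 'symbol in alts' + index() + slice-splice loop that rescans and rebuilds the string after every indel; counting uses a comprehension (ported as structural recursion) instead of A's append loop.
-- outside the precondition, e.g. on _get_base_counts_old('A', '-2-A', ['A', 'C']): A returns [0, 0], B returns [0, 0]
import Mathlib
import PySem

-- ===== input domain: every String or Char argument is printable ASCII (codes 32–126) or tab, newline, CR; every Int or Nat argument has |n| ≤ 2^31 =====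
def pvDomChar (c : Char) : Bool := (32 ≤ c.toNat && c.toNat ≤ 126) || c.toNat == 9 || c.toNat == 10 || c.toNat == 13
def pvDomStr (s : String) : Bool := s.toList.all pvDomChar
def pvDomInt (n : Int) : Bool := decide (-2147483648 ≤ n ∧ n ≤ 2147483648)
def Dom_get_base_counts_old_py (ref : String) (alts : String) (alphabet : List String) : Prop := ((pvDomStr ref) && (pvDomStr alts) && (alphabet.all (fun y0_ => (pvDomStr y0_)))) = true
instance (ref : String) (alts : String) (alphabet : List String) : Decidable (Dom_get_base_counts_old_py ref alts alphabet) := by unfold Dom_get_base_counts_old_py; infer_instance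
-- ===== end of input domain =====

-- B removes the indel annotations with one left-to-right jumping scan per symbol instead of
-- A's repeated 'symbol in alts' + index() + slice-splice loop; return values agree on Pre_.

-- int(alts[i+1]) on the one-character string [d]; the literal call both Pythons make
def parseDigit (d : Char) : Option Int := PySem.Int.ofStr? (String.ofList [d])

-- ===== PORT A =====
-- A's while-loop for one symbol: find the first occurrence (alts.index), read int(alts[i+1]),
-- splice alts[:i]+alts[i+baseNo+2:].  'symbol in alts' / alts.index(symbol) for a 1-char
-- symbol are exactly membership / List.idxOf; the slice bounds are nonnegative (baseNo is
-- int of a single ASCII char, never negative), so take/drop are exact.  Each iteration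
-- shortens the string, so fuel = the string's length makes the loop total (fuel 0 is
-- never reached; it is only a totality device, not a size bound).
def removePhaseF (fuel : Nat) (s : Char) (l : List Char) : List Char :=
  match fuel with
  | 0 => l
  | fuel + 1 =>
    if s ∈ l then
      let i := l.idxOf s
      match l[i+1]? with
      | none => l      -- Python raises IndexError here (excluded by Pre_)
      | some d =>
        match parseDigit d with
        | none => l    -- Python raises ValueError here (excluded by Pre_)
        | some k => removePhaseF fuel s (l.take i ++ l.drop (i + k.toNat + 2))
    else l

def get_base_counts_old_py (ref : String) (alts : String) (alphabet : List String) : List Int :=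
  let u := (PySem.Str.upper alts).toList
  let r1 := removePhaseF u.length '-' u
  let cleaned := String.ofList (removePhaseF r1.length '+' r1)
  alphabet.foldl (fun acc base => acc ++ [if base ≠ ref then ((PySem.Str.count cleaned base : Nat) : Int) else 0]) []

-- ===== PORT B =====
-- B's single scan while i < n: at the symbol read int(alts[i+1]) and jump baseNo+2 (drop
-- those characters), otherwise keep the character and step by 1; the recursion consumes
-- the list structurally (the dropped suffix is strictly shorter), no fuel needed.
def stripIndels (s : Char) (l : List Char) : List Char :=
  match l with
  | [] => []
  | c :: rest =>
    if c = s then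
      match rest with
      | [] => c :: rest            -- Python raises IndexError here (excluded by Pre_)
      | d :: rest' =>
        match parseDigit d with
        | none => c :: d :: rest'  -- Python raises ValueError here (excluded by Pre_)
        | some k => stripIndels s (rest'.drop k.toNat)
    else c :: stripIndels s rest
termination_by l.length
decreasing_by
· simp only [List.length_cons, List.length_drop]; omega
· simp

-- B's comprehension over the alphabet, one slot per base
def tallies (ref : String) (cleaned : String) : List String → List Int
  | [] => []
  | base :: rest =>
    (if base == ref then (0 : Int) else ((PySem.Str.count cleaned base : Nat) : Int))
      :: tallies ref cleaned rest

def get_base_counts_old_py_alt (ref : String) (alts : String) (alphabet : List String) : List Int :=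
  tallies ref
    (String.ofList (stripIndels '+' (stripIndels '-' (PySem.Str.upper alts).toList)))
    alphabet

-- ===== PRECONDITION & SPEC =====
-- every occurrence of the symbol s in l is immediately followed by a character int() accepts (a digit)
abbrev GoodSym (s : Char) (l : List Char) : Prop :=
  ∀ i < l.length, l[i]? = some s → ((l[i+1]?).bind parseDigit).isSome = true

-- Pre_ excludes the inputs where A raises (a '-'/'+' scanned with no following digit:
-- IndexError/ValueError); conservatively it also excludes strings where such an undigited
-- '-'/'+' lies only inside a skipped indel region and is deleted unread — there A returns
-- and B returns the same value (see claim cites).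
def Pre_get_base_counts_old_py (ref : String) (alts : String) (alphabet : List String) : Prop :=
  GoodSym '-' (PySem.Str.upper alts).toList ∧ GoodSym '+' (PySem.Str.upper alts).toList
instance (ref : String) (alts : String) (alphabet : List String) : Decidable (Pre_get_base_counts_old_py ref alts alphabet) := by unfold Pre_get_base_counts_old_py; infer_instance

def pvWitness_get_base_counts_old_py : String × String × List String :=
  ("A", "ac+1gT-0C", ["A", "C", "G", "T"])

def Spec_get_base_counts_old_py (ref : String) (alts : String) (alphabet : List String) (out : List Int) : Prop := out = get_base_counts_old_py_alt ref alts alphabet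
instance (ref : String) (alts : String) (alphabet : List String) (out : List Int) : Decidable (Spec_get_base_counts_old_py ref alts alphabet out) := by unfold Spec_get_base_counts_old_py; infer_instance

-- ===== CLAIM (what is proved, stated in full; the proofs are below) =====
def Claim_equal_get_base_counts_old_py : Prop := ∀ (ref : String) (alts : String) (alphabet : List String), Dom_get_base_counts_old_py ref alts alphabet → Pre_get_base_counts_old_py ref alts alphabet → Spec_get_base_counts_old_py ref alts alphabet (get_base_counts_old_py ref alts alphabet)

-- ===== LEMMAS AND PROOFS =====

theorem stripIndels_of_not_mem {s : Char} {l : List Char} (h : s ∉ l) :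
    stripIndels s l = l := by
  induction l with
  | nil => rw [stripIndels.eq_def]
  | cons c rest ih =>
    rw [stripIndels.eq_def]
    have hc : ¬ c = s := fun hcs => h (hcs ▸ List.mem_cons_self)
    simp only [if_neg hc]
    rw [ih (fun hm => h (List.mem_cons_of_mem _ hm))]

theorem removePhaseF_of_not_mem {s : Char} {l : List Char} (h : s ∉ l) (f : Nat) :
    removePhaseF f s l = l := by
  cases f with
  | zero => rfl
  | succ f => rw [removePhaseF.eq_def]; simp [h]

theorem goodSym_drop {s : Char} {l : List Char} (h : GoodSym s l) (m : Nat) :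
    GoodSym s (l.drop m) := by
  intro i hi hEq
  rw [List.getElem?_drop] at hEq
  rw [List.getElem?_drop]
  have := h (m + i) (by rw [List.length_drop] at hi; omega) hEq
  have harr : m + i + 1 = m + (i + 1) := by omega
  rwa [harr] at this

theorem goodSym_tail {s c : Char} {rest : List Char} (h : GoodSym s (c :: rest)) :
    GoodSym s rest := by
  have := goodSym_drop h 1
  simpa using this

-- key: A's splice loop equals B's jumping scan under GoodSym, with a symbol-free prefix
-- carried along; A's fuel only needs to dominate the unprocessed part's length
theorem removePhase_eq_strip_aux (s : Char) :
    ∀ n (l p : List Char) (fa : Nat), l.length ≤ n → l.length ≤ fa →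
      GoodSym s l → s ∉ p →
      removePhaseF fa s (p ++ l) = p ++ stripIndels s l := by
  intro n
  induction n with
  | zero =>
    intro l p fa hn _ _ hp
    have : l = [] := List.eq_nil_of_length_eq_zero (by omega)
    subst this
    rw [removePhaseF_of_not_mem (by simpa using hp)]
    simp [stripIndels.eq_def]
  | succ n ih =>
    intro l p fa hn hfa hg hp
    by_cases hmem : s ∈ l
    · cases l with
      | nil => cases hmem
      | cons c rest =>
        obtain ⟨fa', rfl⟩ : ∃ fa', fa = fa' + 1 := by
          cases fa with
          | zero => simp at hfa
          | succ m => exact ⟨m, rfl⟩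
        by_cases hc : c = s
        · subst hc
          -- GoodSym at index 0: the next char parses as a digit
          have h0 := hg 0 (by simp) (by simp)
          cases rest with
          | nil => simp at h0
          | cons d rest' =>
            simp only [List.getElem?_cons_succ, List.getElem?_cons_zero, Option.bind_some] at h0
            obtain ⟨k, hk⟩ := Option.isSome_iff_exists.mp h0
            -- A's side: first index is p.length, the splice leaves p ++ rest'.drop k.toNat
            have hmem' : c ∈ p ++ c :: d :: rest' := List.mem_append_right _ hmem
            rw [removePhaseF.eq_def]
            simp only [if_pos hmem']
            have hidx : (p ++ c :: d :: rest').idxOf c = p.length := by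
              rw [List.idxOf_append_of_notMem hp, List.idxOf_cons_eq _ rfl]
              omega
            rw [hidx]
            have hget : (p ++ c :: d :: rest')[p.length + 1]? = some d := by
              rw [List.getElem?_append_right (by omega)]
              simp
            rw [hget]
            simp only [hk]
            have htake : (p ++ c :: d :: rest').take p.length = p := by simp
            have hdrop : (p ++ c :: d :: rest').drop (p.length + k.toNat + 2) = rest'.drop k.toNat := by
              have h2 : p.length + k.toNat + 2 = p.length + (k.toNat + 2) := by omega
              rw [h2, List.drop_append]
              simp [List.drop_succ_cons]
            rw [htake, hdrop]
            have hg' : GoodSym c (rest'.drop k.toNat) := by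
              have := goodSym_drop hg (k.toNat + 2)
              simpa [List.drop_succ_cons] using this
            have hlen : (rest'.drop k.toNat).length ≤ n := by
              simp only [List.length_cons] at hn
              simp only [List.length_drop]
              omega
            rw [ih (rest'.drop k.toNat) p fa' hlen
                  (by simp only [List.length_cons] at hfa; simp only [List.length_drop]; omega)
                  hg' hp]
            -- B's side computes the same
            have hstep : stripIndels c (c :: d :: rest') = stripIndels c (rest'.drop k.toNat) := by
              rw [stripIndels.eq_def]; simp [hk]
            rw [hstep]
        · -- move c into the prefix
          have hp' : s ∉ p ++ [c] := by
            intro hm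
            cases List.mem_append.mp hm with
            | inl h' => exact hp h'
            | inr h' => exact hc (List.mem_singleton.mp h').symm
          have hassoc : p ++ c :: rest = (p ++ [c]) ++ rest := by simp
          rw [hassoc, ih rest (p ++ [c]) (fa' + 1) (by simp at hn ⊢; omega)
                (by simp at hfa ⊢; omega) (goodSym_tail hg) hp']
          conv_rhs => rw [stripIndels.eq_def]
          simp only [if_neg hc]
          simp
    · rw [removePhaseF_of_not_mem (by
        intro hm
        cases List.mem_append.mp hm with
        | inl h' => exact hp h'
        | inr h' => exact hmem h')]
      rw [stripIndels_of_not_mem hmem]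

theorem removePhase_eq_strip {s : Char} {l : List Char} (hg : GoodSym s l) :
    removePhaseF l.length s l = stripIndels s l :=
  removePhase_eq_strip_aux s l.length l [] l.length le_rfl le_rfl hg (by simp)

-- the first phase preserves GoodSym for the other symbol (a digit char never equals '-'/'+')
theorem goodSym_strip (s t : Char) (hs0 : parseDigit s = none) :
    ∀ n (l : List Char), l.length ≤ n → GoodSym t l → GoodSym s l →
      GoodSym t (stripIndels s l) := by
  intro n
  induction n with
  | zero =>
    intro l hn _ _
    have : l = [] := List.eq_nil_of_length_eq_zero (by omega)
    subst this
    intro i hi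
    simp [stripIndels.eq_def] at hi
  | succ n ih =>
    intro l hn hgt hgs
    cases l with
    | nil =>
      intro i hi
      simp [stripIndels.eq_def] at hi
    | cons c rest =>
      by_cases hc : c = s
      · subst hc
        have h0 := hgs 0 (by simp) (by simp)
        cases rest with
        | nil => simp at h0
        | cons d rest' =>
          simp only [List.getElem?_cons_succ, List.getElem?_cons_zero, Option.bind_some] at h0
          obtain ⟨k, hk⟩ := Option.isSome_iff_exists.mp h0
          have hstep : stripIndels c (c :: d :: rest') = stripIndels c (rest'.drop k.toNat) := by
            rw [stripIndels.eq_def]; simp [hk]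
          rw [hstep]
          have hdt : GoodSym t (rest'.drop k.toNat) := by
            have := goodSym_drop hgt (k.toNat + 2)
            simpa [List.drop_succ_cons] using this
          have hds : GoodSym c (rest'.drop k.toNat) := by
            have := goodSym_drop hgs (k.toNat + 2)
            simpa [List.drop_succ_cons] using this
          exact ih (rest'.drop k.toNat)
            (by simp only [List.length_cons] at hn; simp only [List.length_drop]; omega)
            hdt hds
      · rw [stripIndels.eq_def]
        simp only [if_neg hc]
        have htail : GoodSym t (stripIndels s rest) :=
          ih rest (by simp only [List.length_cons] at hn; omega)
            (goodSym_tail hgt) (goodSym_tail hgs)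
        intro i hi hEq
        match i, hi, hEq with
        | 0, _, hEq =>
          -- c = t: its successor in the scan is the digit rest.head, kept by the scan
          simp only [List.getElem?_cons_zero, Option.some.injEq] at hEq
          have h0 := hgt 0 (by simp) (by simp [hEq])
          cases rest with
          | nil => simp at h0
          | cons d rest' =>
            simp only [List.getElem?_cons_succ, List.getElem?_cons_zero, Option.bind_some] at h0
            obtain ⟨k', hk'⟩ := Option.isSome_iff_exists.mp h0
            have hd : ¬ d = s := fun hds => by rw [hds, hs0] at hk'; cases hk'
            rw [stripIndels.eq_def]
            simp only [if_neg hd]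
            simp [hk']
        | (j+1), hi, hEq =>
          simp only [List.getElem?_cons_succ] at hEq
          have hj : j < (stripIndels s rest).length := by
            by_contra hno
            rw [List.getElem?_eq_none_iff.mpr (by omega)] at hEq
            cases hEq
          have := htail j hj hEq
          simpa using this

-- A's append loop over the alphabet is B's tallies
theorem foldl_append_eq_tallies (ref cleaned : String) (alphabet : List String) (acc : List Int) :
    alphabet.foldl (fun acc base => acc ++ [if base ≠ ref then ((PySem.Str.count cleaned base : Nat) : Int) else 0]) acc
      = acc ++ tallies ref cleaned alphabet := by
  induction alphabet generalizing acc with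
  | nil => simp [tallies]
  | cons b rest ih =>
    simp only [List.foldl_cons, tallies]
    rw [ih]
    have : (if b ≠ ref then ((PySem.Str.count cleaned b : Nat) : Int) else 0)
        = (if b == ref then (0 : Int) else ((PySem.Str.count cleaned b : Nat) : Int)) := by
      by_cases h : b = ref <;> simp [h]
    rw [this]
    simp

-- ===== VERDICT (by name: the statement is the Claim_ definition above) =====
theorem get_base_counts_old_py_spec : Claim_equal_get_base_counts_old_py := by
  intro ref alts alphabet _ hpre
  obtain ⟨hminus, hplus⟩ := hpre
  unfold Spec_get_base_counts_old_py
  unfold get_base_counts_old_py get_base_counts_old_py_alt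
  simp only []
  set u := (PySem.Str.upper alts).toList with hu
  -- phase '-': both loops produce the same string
  have h1 : removePhaseF u.length '-' u = stripIndels '-' u :=
    removePhase_eq_strip hminus
  rw [h1]
  -- phase '+': GoodSym '+' survives phase '-', and the fuel dominates the length
  set w := stripIndels '-' u with hw
  have hgw : GoodSym '+' w :=
    goodSym_strip '-' '+' (by decide) u.length u le_rfl hplus hminus
  have h2 : removePhaseF w.length '+' w = stripIndels '+' w :=
    removePhase_eq_strip hgw
  rw [h2]
  exact foldl_append_eq_tallies ref _ alphabet []
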